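-- pv_equiv track=rewrite | github.com/alexlin44/comp110-23s-workspace | exercises/ex08/data_utils.py | columnar
-- ===== SOURCE A (Python) =====
-- def columnar(rows: list[dict[str, str]]) -> dict[str, list[str]]:
--     """Transforms a list of rows into a dictionary of columns."""
--     columns: dict[str, list[str]] = {}
--     for row in rows:
--         for column, value in row.items():
--             if column not in columns:
--                 columns[column] = []
--             columns[column].append(value)
--     return columns
-- ===== SOURCE B (Python) =====
-- def columnar(rows: list[dict[str, str]]) -> dict[str, list[str]]:
--     """Transforms a list of rows into a dictionary of columns (column-major two-pass)."""
--     keys: list[str] = []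
--     for row in rows:
--         for column in row:
--             if column not in keys:
--                 keys.append(column)
--     return {column: [row[column] for row in rows if column in row] for column in keys}
-- ===== Notes on version B (the rewrite author's own statement) =====
-- stated objective: alternative
-- what changed: Replaces A's row-major single pass that grows per-column lists inside one dict with a column-major two-pass scheme: one pass collects the distinct column keys in first-appearance order, then each column's value list is assembled by a scan over the rows.
import Mathlib
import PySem

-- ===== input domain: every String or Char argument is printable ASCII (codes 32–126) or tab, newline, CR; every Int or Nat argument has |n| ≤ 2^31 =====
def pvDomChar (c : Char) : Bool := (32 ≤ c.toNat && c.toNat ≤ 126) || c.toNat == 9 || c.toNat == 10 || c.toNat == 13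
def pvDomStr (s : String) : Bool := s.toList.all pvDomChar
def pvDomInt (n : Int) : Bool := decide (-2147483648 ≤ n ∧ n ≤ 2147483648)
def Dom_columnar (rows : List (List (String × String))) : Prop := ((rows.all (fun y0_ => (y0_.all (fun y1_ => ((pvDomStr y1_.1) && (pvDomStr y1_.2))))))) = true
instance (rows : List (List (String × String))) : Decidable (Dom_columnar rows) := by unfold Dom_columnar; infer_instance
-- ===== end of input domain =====

-- B is column-major (keys pass, then one rows scan per column) instead of A's row-major single dict pass; same cost class, no speed claim.

-- ===== PORT A =====
def columnar (rows : List (List (String × String))) : List (String × List String) :=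
  (rows.foldl
    (fun columns row =>
      row.foldl
        (fun columns kv =>
          let columns :=
            if columns.contains kv.1 then columns else columns.insert kv.1 ([] : List String)
          columns.modify kv.1 [] (fun l => l ++ [kv.2]))
        columns)
    (PySem.Dict.empty : PySem.Dict String (List String))).items

-- ===== PORT B =====
def columnar_alt (rows : List (List (String × String))) : List (String × List String) :=
  let keys := rows.foldl
    (fun ks row =>
      row.foldl (fun ks kv => if ks.contains kv.1 then ks else ks ++ [kv.1]) ks)
    ([] : List String)
  keys.map (fun k => (k, rows.filterMap (fun row => (PySem.Dict.mk row).get? k)))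

-- ===== PRECONDITION & SPEC =====
-- Pre_ only requires each row to be a genuine Python dict: its keys are distinct. Every input
-- the Python programs can receive satisfies this (dict keys are unique); it excludes nothing A returns on.
def Pre_columnar (rows : List (List (String × String))) : Prop :=
  ∀ row ∈ rows, (row.map Prod.fst).Nodup
instance (rows : List (List (String × String))) : Decidable (Pre_columnar rows) := by
  unfold Pre_columnar; infer_instance
def pvWitness_columnar : (List (List (String × String))) :=
  [[("a", "1"), ("b", "2")], [("a", "3")]]
def Spec_columnar (rows : List (List (String × String))) (out : List (String × List String)) : Prop := out = columnar_alt rows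
instance (rows : List (List (String × String))) (out : List (String × List String)) : Decidable (Spec_columnar rows out) := by unfold Spec_columnar; infer_instance

-- ===== CLAIM (what is proved, stated in full; the proofs are below) =====
def Claim_equal_columnar : Prop := ∀ (rows : List (List (String × String))), Dom_columnar rows → Pre_columnar rows → Spec_columnar rows (columnar rows)

-- ===== LEMMAS AND PROOFS =====

-- A's inner two Python lines (insert-empty-if-absent, then append) are one Dict.modify.
theorem get?_mk_app (l : List (String × List String)) (k : String) (v : List String)
    (hk : ∀ p ∈ l, p.1 ≠ k) :
    (PySem.Dict.mk (l ++ [(k, v)])).get? k = some v := by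
  induction l with
  | nil => simp [PySem.Dict.get?_mk_cons]
  | cons p t ih =>
      rw [List.cons_append, PySem.Dict.get?_mk_cons]
      have : p.1 ≠ k := hk p (by simp)
      simp [this, ih (fun q hq => hk q (by simp [hq]))]

theorem stepA_eq (d : PySem.Dict String (List String)) (k v : String) :
    (if d.contains k then d else d.insert k ([] : List String)).modify k [] (· ++ [v])
      = d.modify k [] (· ++ [v]) := by
  by_cases h : d.contains k = true
  · simp [h]
  · have h' : d.contains k = false := by simpa using h
    have hk : ∀ p ∈ d.items, p.1 ≠ k := by
      intro p hp hpk
      have : k ∈ d.keys := by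
        simp only [PySem.Dict.keys]
        exact List.mem_map.mpr ⟨p, hp, hpk⟩
      exact absurd ((PySem.Dict.contains_iff_mem_keys d k).mpr this) (by simp [h'])
    simp only [h', Bool.false_eq_true, ite_false]
    simp [PySem.Dict.modify, PySem.Dict.insert, h']
    constructor
    · have : List.map (fun p => if p.1 = k then (k, ({ items := d.items ++ [(k, ([] : List String))] } : PySem.Dict String (List String)).getD k [] ++ [v]) else p) d.items = List.map id d.items :=
        List.map_congr_left (fun p hp => by simp [hk p hp])
      simpa using this
    · rw [PySem.Dict.getD_eq_get?_getD, get?_mk_app d.items k [] hk]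
      simp [PySem.Dict.getD_of_not_contains (h := h')]

-- the nested row-by-row loop is the flat loop over all cells
theorem foldl_nested {α β : Type} (rows : List (List α)) (f : β → α → β) (i : β) :
    rows.foldl (fun a r => r.foldl f a) i = (rows.flatMap id).foldl f i := by
  induction rows generalizing i with
  | nil => rfl
  | cons r t ih => simp [List.foldl_append, ih]

-- dict-lookup of a nodup-key row, as filter-then-project
theorem lookup_toList (row : List (String × String)) (k : String)
    (hnd : (row.map Prod.fst).Nodup) :
    ((PySem.Dict.mk row).get? k).toList = (row.filter (fun p => p.1 == k)).map Prod.snd := by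
  induction row with
  | nil => simp [PySem.Dict.get?]
  | cons p t ih =>
      rw [PySem.Dict.get?_mk_cons]
      by_cases hpk : p.1 = k
      · have h1 : p.1 ∉ t.map Prod.fst ∧ (t.map Prod.fst).Nodup := by
          simpa [List.nodup_cons] using hnd
        have hknot : k ∉ t.map Prod.fst := hpk ▸ h1.1
        have hfil : t.filter (fun q => q.1 == k) = [] := by
          rw [List.filter_eq_nil_iff]
          intro q hq
          simp only [beq_iff_eq]
          intro hqk
          exact hknot (hqk ▸ List.mem_map.mpr ⟨q, hq, rfl⟩)
        simp [hpk, hfil]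
      · have hbe : (p.1 == k) = false := by simp [hpk]
        have h1 : p.1 ∉ t.map Prod.fst ∧ (t.map Prod.fst).Nodup := by
          simpa [List.nodup_cons] using hnd
        simp [hbe, ih h1.2]

-- B's key pass is Set.update of the flattened key stream
theorem keysB_eq (l : List (String × String)) (s : List String) :
    l.foldl (fun ks kv => if ks.contains kv.1 then ks else ks ++ [kv.1]) s
      = PySem.Set.update s (l.map Prod.fst) := by
  rw [PySem.Set.update_map_eq_foldl_add]
  rfl

-- B's per-column rows scan, as the filtered flattened cell stream (per-row keys distinct)
theorem vals_eq (rows : List (List (String × String))) (k : String)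
    (hpre : ∀ row ∈ rows, (row.map Prod.fst).Nodup) :
    ((rows.flatMap id).filter (fun p => p.1 == k)).map Prod.snd
      = rows.filterMap (fun row => (PySem.Dict.mk row).get? k) := by
  rw [List.filterMap_eq_flatMap_toList]
  induction rows with
  | nil => rfl
  | cons r t ih =>
      simp only [List.flatMap_cons, id, List.filter_append, List.map_append]
      rw [lookup_toList r k (hpre r (by simp)), ih (fun row hr => hpre row (by simp [hr]))]

theorem columnarA_flat (rows : List (List (String × String))) :
    columnar rows
      = ((rows.flatMap id).foldl
          (fun d kv => d.modify kv.1 [] (fun l => l ++ [kv.2]))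
          (PySem.Dict.empty : PySem.Dict String (List String))).items := by
  unfold columnar
  have hstepfun : (fun (c : PySem.Dict String (List String)) (kv : String × String) =>
      let c' := if c.contains kv.1 then c else c.insert kv.1 ([] : List String)
      c'.modify kv.1 [] (fun l => l ++ [kv.2]))
        = fun c kv => c.modify kv.1 [] (fun l => l ++ [kv.2]) := by
    funext c kv; exact stepA_eq c kv.1 kv.2
  rw [hstepfun, foldl_nested]

theorem columnar_spec : Claim_equal_columnar := by
  intro rows _hdom hpre
  unfold Spec_columnar
  rw [columnarA_flat]
  have hnd : ((rows.flatMap id).foldl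
      (fun d kv => d.modify kv.1 [] (fun l => l ++ [kv.2]))
      (PySem.Dict.empty : PySem.Dict String (List String))).keys.Nodup :=
    PySem.Dict.nodup_keys_foldl_modify_key (rows.flatMap id) Prod.fst []
      (fun _ kv => fun l => l ++ [kv.2]) PySem.Dict.empty (by simp [PySem.Dict.keys_empty])
  rw [PySem.Dict.items_eq_map_keys _ hnd []]
  rw [PySem.Dict.keys_foldl_modify_key]
  unfold columnar_alt
  rw [foldl_nested, keysB_eq]
  simp only [PySem.Dict.keys_empty]
  apply List.map_congr_left
  intro k hk
  rw [PySem.Dict.getD_foldl_modify_append]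
  simp only [PySem.Dict.getD_empty, List.nil_append]
  rw [vals_eq rows k hpre]
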